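-- pv_equiv track=rewrite | github.com/abhijeetgupto/LeetCode | making-file-names-unique/making-file-names-unique.py | getFolderNames
-- ===== SOURCE A (Python) =====
-- from typing import List
--
-- def getFolderNames(names: List[str]) -> List[str]:
--
--     dic = {}
--     res = []
--
--     for name in names :
--         if name in dic :
--             temp = name + f"({dic[name]+1})"
--             dic[name] += 1
--             while temp in dic:
--                 temp = name + f"({dic[name]+1})"
--                 dic[name] += 1
--             dic[temp] = 0
--             res.append(temp)
--         else :
--             dic[name] = 0
--             res.append(name)
--     return res
-- ===== SOURCE B (Python) =====
-- from typing import List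
--
-- def getFolderNames(names: List[str]) -> List[str]:
--     used = set()
--     res = []
--     for name in names:
--         if name not in used:
--             cand = name
--         else:
--             k = 1
--             while name + f"({k})" in used:
--                 k += 1
--             cand = name + f"({k})"
--         used.add(cand)
--         res.append(cand)
--     return res
-- ===== Notes on version B (the rewrite author's own statement) =====
-- stated objective: simpler
-- what changed: Replaces A's dict of per-base resume counters (with its counter-bumping while loop) by a single set of already-assigned names, rescanning suffixes from k=1 on each collision; equivalent because assigned names are never freed, so both pick the smallest free suffix.
import Mathlib
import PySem

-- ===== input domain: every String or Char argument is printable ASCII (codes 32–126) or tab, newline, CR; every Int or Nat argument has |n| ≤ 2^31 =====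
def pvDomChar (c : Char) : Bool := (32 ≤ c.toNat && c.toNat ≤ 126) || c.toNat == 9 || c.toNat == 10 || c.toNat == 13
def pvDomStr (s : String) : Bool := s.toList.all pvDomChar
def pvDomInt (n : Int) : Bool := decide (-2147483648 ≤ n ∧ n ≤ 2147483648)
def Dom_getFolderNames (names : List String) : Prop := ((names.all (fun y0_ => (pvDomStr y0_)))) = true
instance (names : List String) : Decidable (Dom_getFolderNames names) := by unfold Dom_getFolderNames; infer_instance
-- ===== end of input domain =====

-- B replaces A's per-base resume-counter dict by a single set of assigned names, rescanning suffixes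
-- from 1 on each collision (simpler state); both always pick the smallest free suffix.

-- shared formatting helper: name + f"({k})" (the identical f-string appears in both Pythons)
def pvFmt (name : String) (k : Int) : String := name ++ "(" ++ PySem.Int.toStr k ++ ")"

-- ===== PORT A =====
-- the 'while temp in dic' loop; fuel only makes the recursion structural — it is provably
-- sufficient at the call site (pigeonhole over the dict's keys; see pvWhileA_spec below)
def pvWhileA (name : String) (dic : PySem.Dict String Int) (temp : String) :
    Nat → PySem.Dict String Int × String
  | 0 => (dic, temp)
  | fuel+1 =>
    if dic.contains temp then
      pvWhileA name (dic.insert name (dic.getD name 0 + 1))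
        (pvFmt name (dic.getD name 0 + 1)) fuel
    else (dic, temp)

def pvStepA (st : PySem.Dict String Int × List String) (name : String) :
    PySem.Dict String Int × List String :=
  let dic := st.1
  let res := st.2
  if dic.contains name then
    let temp := pvFmt name (dic.getD name 0 + 1)
    let dic1 := dic.insert name (dic.getD name 0 + 1)
    let r := pvWhileA name dic1 temp (dic1.size + 1)
    (r.1.insert r.2 0, res ++ [r.2])
  else
    (dic.insert name 0, res ++ [name])

def getFolderNames (names : List String) : List String :=
  (names.foldl pvStepA (PySem.Dict.empty, [])).2

-- ===== PORT B =====
-- the 'while name + f"({k})" in used' loop; same fuel remark (see pvScanB_eq below)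
def pvScanB (used : PySem.Set String) (name : String) (k : Int) : Nat → Int
  | 0 => k
  | fuel+1 =>
    if PySem.Set.contains used (pvFmt name k) then pvScanB used name (k+1) fuel else k

def pvStepB (st : PySem.Set String × List String) (name : String) :
    PySem.Set String × List String :=
  let used := st.1
  let res := st.2
  let cand :=
    if PySem.Set.contains used name then
      pvFmt name (pvScanB used name 1 (used.length + 1))
    else name
  (PySem.Set.add used cand, res ++ [cand])

def getFolderNames_alt (names : List String) : List String :=
  (names.foldl pvStepB (PySem.Set.empty, [])).2

-- ===== PRECONDITION & SPEC =====
def Spec_getFolderNames (names : List String) (out : List String) : Prop := out = getFolderNames_alt names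
instance (names : List String) (out : List String) : Decidable (Spec_getFolderNames names out) := by unfold Spec_getFolderNames; infer_instance

-- ===== CLAIM (what is proved, stated in full; the proofs are below) =====
def Claim_equal_getFolderNames : Prop := ∀ (names : List String), Dom_getFolderNames names → Spec_getFolderNames names (getFolderNames names)

-- ===== LEMMAS AND PROOFS =====

-- decimal decoding, used only to prove str(n) injective
def pvDec (cs : List Char) : Nat := cs.foldl (fun a c => a * 10 + (c.toNat - 48)) 0

theorem pvTdcShift (f : Nat) : ∀ (n : Nat) (l : List Char),
    Nat.toDigitsCore 10 f n l = Nat.toDigitsCore 10 f n [] ++ l := by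
  induction f with
  | zero => intro n l; simp [Nat.toDigitsCore]
  | succ f ih =>
    intro n l
    simp only [Nat.toDigitsCore]
    by_cases h : n / 10 = 0
    · simp [h]
    · simp only [h, if_false]
      rw [ih (n / 10) ((n % 10).digitChar :: l), ih (n / 10) [(n % 10).digitChar]]
      simp

theorem pvDec_append (xs : List Char) (c : Char) :
    pvDec (xs ++ [c]) = pvDec xs * 10 + (c.toNat - 48) := by
  simp [pvDec]

theorem pvDec_digitChar (d : Nat) (h : d < 10) : (Nat.digitChar d).toNat - 48 = d := by
  interval_cases d <;> decide

theorem pvDec_toDigitsCore (f : Nat) : ∀ n : Nat, n < f →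
    pvDec (Nat.toDigitsCore 10 f n []) = n := by
  induction f with
  | zero => intro n h; omega
  | succ f ih =>
    intro n h
    simp only [Nat.toDigitsCore]
    by_cases h10 : n / 10 = 0
    · simp only [h10, if_true]
      have : pvDec [(n % 10).digitChar] = (n % 10).digitChar.toNat - 48 := by simp [pvDec]
      rw [this, pvDec_digitChar _ (Nat.mod_lt _ (by norm_num))]
      omega
    · simp only [h10, if_false]
      rw [pvTdcShift, pvDec_append, ih (n / 10) (by omega), pvDec_digitChar _ (Nat.mod_lt _ (by norm_num))]
      omega

theorem pvToDigits_inj {a b : Nat} (h : Nat.toDigits 10 a = Nat.toDigits 10 b) : a = b := by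
  have ha := pvDec_toDigitsCore (a + 1) a (by omega)
  have hb := pvDec_toDigitsCore (b + 1) b (by omega)
  simp only [Nat.toDigits] at h
  rw [h] at ha
  rw [ha] at hb
  exact hb

theorem pvFmt_inj {name : String} {j k : Int} (hj : 0 < j) (hk : 0 < k)
    (h : pvFmt name j = pvFmt name k) : j = k := by
  have h' := congrArg String.toList h
  simp only [pvFmt, String.toList_append] at h'
  have h2 : (PySem.Int.toStr j).toList ++ ")".toList = (PySem.Int.toStr k).toList ++ ")".toList := by
    have h'' : name.toList ++ ("(".toList ++ ((PySem.Int.toStr j).toList ++ ")".toList)) =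
        name.toList ++ ("(".toList ++ ((PySem.Int.toStr k).toList ++ ")".toList)) := by
      simpa [List.append_assoc] using h'
    exact List.append_cancel_left (List.append_cancel_left h'')
  have h3 : (PySem.Int.toStr j).toList = (PySem.Int.toStr k).toList :=
    List.append_cancel_right h2
  rw [PySem.Int.toList_toStr, PySem.Int.toList_toStr] at h3
  simp only [PySem.Int.toChars, if_neg (by omega : ¬ j < 0), if_neg (by omega : ¬ k < 0)] at h3
  have := pvToDigits_inj h3
  omega

-- pigeonhole: among K.length + 1 distinct candidates one is free
theorem pvExistsFree (K : List String) (name : String) (c : Int) (hc : 0 < c) :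
    ∃ j : Nat, j ≤ K.length ∧ pvFmt name (c + j) ∉ K := by
  by_contra h
  push_neg at h
  have hall : ∀ j ≤ K.length, pvFmt name (c + j) ∈ K := h
  set L := (List.range (K.length + 1)).map (fun j : Nat => pvFmt name (c + (j : Int))) with hL
  have hnodup : L.Nodup := by
    rw [hL]
    refine List.Nodup.map_on ?_ (List.nodup_range)
    intro x hx y hy hxy
    have hx0 : (0:Int) ≤ (x:Int) := Int.natCast_nonneg x
    have hy0 : (0:Int) ≤ (y:Int) := Int.natCast_nonneg y
    have := pvFmt_inj (by omega) (by omega) hxy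
    omega
  have hsub : ∀ x ∈ L, x ∈ K := by
    intro x hx
    rw [hL] at hx
    simp only [List.mem_map, List.mem_range] at hx
    obtain ⟨j, hj, rfl⟩ := hx
    exact hall j (by omega)
  have hcard : L.toFinset.card ≤ K.toFinset.card :=
    Finset.card_le_card (fun x hx => List.mem_toFinset.2 (hsub x (List.mem_toFinset.1 hx)))
  rw [List.toFinset_card_of_nodup hnodup] at hcard
  have : L.length = K.length + 1 := by simp [hL]
  have := List.toFinset_card_le K
  omega

-- the scanned predicate shifts by one after a hit
theorem pvHexShift (K : List String) (name : String) (c : Int)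
    (hex : ∃ j : Nat, pvFmt name (c + j) ∉ K) (h0 : pvFmt name c ∈ K) :
    ∃ j : Nat, pvFmt name ((c + 1) + j) ∉ K := by
  obtain ⟨j, hj⟩ := hex
  match j, hj with
  | 0, hj => exact absurd h0 (by simpa using hj)
  | j+1, hj =>
    refine ⟨j, ?_⟩
    have e : (c + 1) + (j : Int) = c + ((j + 1 : Nat) : Int) := by push_cast; ring
    rw [e]; exact hj

theorem pvFind_shift (K : List String) (name : String) (c : Int)
    (hex : ∃ j : Nat, pvFmt name (c + j) ∉ K) (h0 : pvFmt name c ∈ K)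
    (hex' : ∃ j : Nat, pvFmt name ((c + 1) + j) ∉ K) :
    Nat.find hex = Nat.find hex' + 1 := by
  rw [Nat.find_eq_iff]
  refine ⟨?_, ?_⟩
  · have hsp := Nat.find_spec hex'
    have e : c + ((Nat.find hex' + 1 : Nat) : Int) = (c + 1) + (Nat.find hex' : Int) := by
      push_cast; ring
    rw [e]; exact hsp
  · intro m hm
    match m, hm with
    | 0, _ => simpa using h0
    | m'+1, hm =>
      have hm' : m' < Nat.find hex' := by omega
      have hmin := Nat.find_min hex' hm'
      have e : c + ((m' + 1 : Nat) : Int) = (c + 1) + (m' : Int) := by push_cast; ring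
      rw [e]
      simpa using hmin

-- B's scan computes c + (least free offset)
theorem pvScanB_eq (used : List String) (name : String) :
    ∀ (fuel : Nat) (c : Int)
    (hex : ∃ j : Nat, pvFmt name (c + j) ∉ used),
    Nat.find hex ≤ fuel →
    pvScanB used name c fuel = c + Nat.find hex := by
  intro fuel
  induction fuel with
  | zero =>
    intro c hex hf
    have h0 : Nat.find hex = 0 := by omega
    rw [h0]
    simp [pvScanB]
  | succ f ih =>
    intro c hex hf
    by_cases hmem : pvFmt name c ∈ used
    · have hex' := pvHexShift used name c hex hmem
      have hshift := pvFind_shift used name c hex hmem hex'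
      have hcont : PySem.Set.contains used (pvFmt name c) = true := by
        simp [PySem.Set.contains, hmem]
      simp only [pvScanB, hcont, if_true]
      rw [ih (c+1) hex' (by omega), hshift]
      push_cast; ring
    · have hfind : Nat.find hex = 0 := by
        rw [Nat.find_eq_iff]
        exact ⟨by simpa using hmem, by omega⟩
      have hcont : PySem.Set.contains used (pvFmt name c) = false := by
        simp [PySem.Set.contains, hmem]
      simp only [pvScanB, hcont, if_false, Bool.false_eq_true]
      rw [hfind]
      simp

-- A's while loop: full characterisation of the resulting dict and temp
theorem pvWhileA_spec (name : String) (K : List String) :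
    ∀ (fuel : Nat) (dic : PySem.Dict String Int) (c : Int),
    dic.keys = K →
    dic.get? name = some c →
    (hex : ∃ j : Nat, pvFmt name (c + j) ∉ K) →
    Nat.find hex ≤ fuel →
    (pvWhileA name dic (pvFmt name c) fuel).2 = pvFmt name (c + Nat.find hex) ∧
    (pvWhileA name dic (pvFmt name c) fuel).1.keys = K ∧
    (pvWhileA name dic (pvFmt name c) fuel).1.get? name = some (c + Nat.find hex) ∧
    (∀ x, x ≠ name → (pvWhileA name dic (pvFmt name c) fuel).1.get? x = dic.get? x) := by
  intro fuel
  induction fuel with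
  | zero =>
    intro dic c hkeys hc hex hf
    have h0 : Nat.find hex = 0 := by omega
    rw [h0]
    simp [pvWhileA, hc, hkeys]
  | succ f ih =>
    intro dic c hkeys hc hex hf
    by_cases hmem : pvFmt name c ∈ K
    · have hcont : dic.contains (pvFmt name c) = true := by
        rw [PySem.Dict.contains_iff_mem_keys, hkeys]; exact hmem
      have hcname : dic.contains name = true := by
        rw [PySem.Dict.contains_eq_isSome_get?, hc]; rfl
      have hgetD : dic.getD name 0 = c := PySem.Dict.getD_of_get?_eq_some dic 0 hc
      have hk1 : (dic.insert name (c + 1)).keys = K := by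
        rw [PySem.Dict.keys_insert_of_contains dic (c + 1) hcname]; exact hkeys
      have hg1 : (dic.insert name (c + 1)).get? name = some (c + 1) :=
        PySem.Dict.get?_insert_self dic name (c + 1)
      have hex' := pvHexShift K name c hex hmem
      have hshift := pvFind_shift K name c hex hmem hex'
      obtain ⟨w2, wk, wg, wo⟩ := ih (dic.insert name (c + 1)) (c + 1) hk1 hg1 hex' (by omega)
      have heval : pvWhileA name dic (pvFmt name c) (f + 1) =
          pvWhileA name (dic.insert name (c + 1)) (pvFmt name (c + 1)) f := by
        simp only [pvWhileA, hcont, if_true, hgetD]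
      have hcast : c + (Nat.find hex : Int) = (c + 1) + (Nat.find hex' : Int) := by
        rw [hshift]; push_cast; ring
      refine ⟨?_, ?_, ?_, ?_⟩
      · rw [heval, hcast]; exact w2
      · rw [heval]; exact wk
      · rw [heval, hcast]; exact wg
      · intro x hx
        rw [heval, wo x hx, PySem.Dict.get?_insert_of_ne dic (c + 1) hx]
    · have hfind : Nat.find hex = 0 := by
        rw [Nat.find_eq_iff]
        exact ⟨by simpa using hmem, by omega⟩
      have hcont : dic.contains (pvFmt name c) = false := by
        rw [← Bool.not_eq_true, PySem.Dict.contains_iff_mem_keys, hkeys]; exact hmem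
      rw [hfind]
      simp [pvWhileA, hcont, hc, hkeys]

-- the invariant tying A's dict to B's set of assigned names
def pvInv (dic : PySem.Dict String Int) (used : List String) : Prop :=
  dic.keys = used ∧
  ∀ x v, dic.get? x = some v → 0 ≤ v ∧ ∀ k : Int, 1 ≤ k → k ≤ v → pvFmt x k ∈ used

theorem pvStep_eq (dic : PySem.Dict String Int) (used : List String)
    (resA resB : List String) (name : String) (hinv : pvInv dic used) :
    ∃ out dic',
      pvStepA (dic, resA) name = (dic', resA ++ [out]) ∧
      pvStepB (used, resB) name = (used ++ [out], resB ++ [out]) ∧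
      pvInv dic' (used ++ [out]) := by
  obtain ⟨hkeys, hvals⟩ := hinv
  by_cases hmem : name ∈ dic.keys
  · -- collision branch
    obtain ⟨v, hv⟩ : ∃ v, dic.get? name = some v := by
      cases hget : dic.get? name with
      | none => exact absurd ((PySem.Dict.get?_eq_none_iff_not_mem_keys dic name).1 hget) (by simpa using hmem)
      | some v => exact ⟨v, rfl⟩
    obtain ⟨hv0, hvmem⟩ := hvals name v hv
    have hcont : dic.contains name = true := by
      rw [PySem.Dict.contains_iff_mem_keys]; exact hmem
    have hgetD : dic.getD name 0 = v := PySem.Dict.getD_of_get?_eq_some dic 0 hv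
    have hk1 : (dic.insert name (v + 1)).keys = dic.keys :=
      PySem.Dict.keys_insert_of_contains dic (v + 1) hcont
    have hg1 : (dic.insert name (v + 1)).get? name = some (v + 1) :=
      PySem.Dict.get?_insert_self dic name (v + 1)
    obtain ⟨j0, hj0len, hj0free⟩ := pvExistsFree dic.keys name (v + 1) (by omega)
    have hexA : ∃ j : Nat, pvFmt name ((v + 1) + j) ∉ dic.keys := ⟨j0, hj0free⟩
    have hfuelA : Nat.find hexA ≤ (dic.insert name (v + 1)).size + 1 := by
      have h1 := Nat.find_min' hexA hj0free
      have h2 : dic.keys.length ≤ dic.size := by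
        simp [PySem.Dict.keys, PySem.Dict.size]
      have h3 : dic.size ≤ (dic.insert name (v + 1)).size := by
        rw [PySem.Dict.size_insert]; split_ifs <;> omega
      omega
    obtain ⟨w2, wk, wg, wo⟩ := pvWhileA_spec name dic.keys
      ((dic.insert name (v + 1)).size + 1) (dic.insert name (v + 1)) (v + 1) hk1 hg1 hexA hfuelA
    -- the chosen suffix
    have hfreeK : pvFmt name ((v + 1) + (Nat.find hexA : Int)) ∉ dic.keys := Nat.find_spec hexA
    have hfreeU : pvFmt name ((v + 1) + (Nat.find hexA : Int)) ∉ used := by rw [← hkeys]; exact hfreeK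
    -- B's scan agrees
    have husedc : PySem.Set.contains used name = true := by
      simp only [PySem.Set.contains]
      simp only [List.contains_eq_mem, decide_eq_true_eq]
      rw [← hkeys]; exact hmem
    obtain ⟨j1, hj1len, hj1free⟩ := pvExistsFree used name 1 (by omega)
    have hexB : ∃ j : Nat, pvFmt name ((1:Int) + j) ∉ used := ⟨j1, hj1free⟩
    have hfuelB : Nat.find hexB ≤ used.length + 1 := by
      have := Nat.find_min' hexB hj1free
      omega
    have hscan : pvScanB used name 1 (used.length + 1) = 1 + Nat.find hexB :=
      pvScanB_eq used name (used.length + 1) 1 hexB hfuelB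
    have hmeq : (1:Int) + Nat.find hexB = (v + 1) + Nat.find hexA := by
      have hfreeB : pvFmt name ((1:Int) + (Nat.find hexB : Int)) ∉ used := Nat.find_spec hexB
      have h1 : v + 1 ≤ (1:Int) + Nat.find hexB := by
        by_contra hlt
        push_neg at hlt
        exact hfreeB (hvmem (1 + Nat.find hexB) (by omega) (by omega))
      have h2 : (v + 1) + (Nat.find hexA : Int) ≤ 1 + Nat.find hexB := by
        have e : (v + 1) + (((1 + (Nat.find hexB : Int)) - (v + 1)).toNat : Int) =
            1 + (Nat.find hexB : Int) := by omega
        have hfr : pvFmt name ((v + 1) + (((1 + (Nat.find hexB : Int)) - (v + 1)).toNat : Int)) ∉ dic.keys := by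
          rw [e, hkeys]; exact hfreeB
        have := Nat.find_min' hexA hfr
        omega
      have h3 : 1 + (Nat.find hexB : Int) ≤ (v + 1) + Nat.find hexA := by
        have e : (1:Int) + ((((v + 1) + (Nat.find hexA : Int)) - 1).toNat : Int) =
            (v + 1) + (Nat.find hexA : Int) := by omega
        have hfr : pvFmt name ((1:Int) + ((((v + 1) + (Nat.find hexA : Int)) - 1).toNat : Int)) ∉ used := by
          rw [e]; exact hfreeU
        have := Nat.find_min' hexB hfr
        omega
      omega
    -- name the loop result and the chosen output
    refine ⟨pvFmt name ((v + 1) + (Nat.find hexA : Int)),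
      (pvWhileA name (dic.insert name (v + 1)) (pvFmt name (v + 1))
        ((dic.insert name (v + 1)).size + 1)).1.insert
        (pvFmt name ((v + 1) + (Nat.find hexA : Int))) 0, ?_, ?_, ?_⟩
    · -- A's step
      simp only [pvStepA, hcont, if_true, hgetD]
      rw [w2]
    · -- B's step
      have hcf : PySem.Set.contains used (pvFmt name ((v + 1) + (Nat.find hexA : Int))) = false := by
        simp only [PySem.Set.contains]
        simp only [List.contains_eq_mem, decide_eq_false_iff_not]
        exact hfreeU
      simp only [pvStepB, husedc, if_true, hscan, hmeq, PySem.Set.add, hcf]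
      simp
    · -- the invariant is preserved
      have hwcont : (pvWhileA name (dic.insert name (v + 1)) (pvFmt name (v + 1))
          ((dic.insert name (v + 1)).size + 1)).1.contains
          (pvFmt name ((v + 1) + (Nat.find hexA : Int))) = false := by
        rw [← Bool.not_eq_true, PySem.Dict.contains_iff_mem_keys, wk]
        exact hfreeK
      constructor
      · rw [PySem.Dict.keys_insert_of_not_contains _ _ hwcont, wk]
        exact congrArg (fun l => l ++ [pvFmt name ((v + 1) + (Nat.find hexA : Int))]) hkeys
      · intro x u hx
        by_cases hxm : x = pvFmt name ((v + 1) + (Nat.find hexA : Int))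
        · subst hxm
          rw [PySem.Dict.get?_insert_self] at hx
          cases hx
          exact ⟨le_refl 0, fun k hk1 hk2 => absurd (hk1.trans hk2) (by norm_num)⟩
        · rw [PySem.Dict.get?_insert_of_ne _ _ hxm] at hx
          by_cases hxn : x = name
          · subst hxn
            rw [wg] at hx
            cases hx
            refine ⟨by omega, fun k hk1 hk2 => ?_⟩
            by_cases hkv : k ≤ v
            · exact List.mem_append_left _ (hvmem k hk1 hkv)
            · by_cases hkm : k = (v + 1) + (Nat.find hexA : Int)
              · subst hkm; exact List.mem_append_right _ (by simp)
              · -- v + 1 ≤ k < chosen: a scanned, occupied candidate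
                have hklt : k < (v + 1) + (Nat.find hexA : Int) := by omega
                have hj : (k - (v + 1)).toNat < Nat.find hexA := by omega
                have := Nat.find_min hexA hj
                have e : (v + 1) + (((k - (v + 1)).toNat : Int)) = k := by omega
                rw [e] at this
                simp only [not_not] at this
                exact List.mem_append_left _ (by rw [← hkeys]; exact this)
          · rw [wo x hxn, PySem.Dict.get?_insert_of_ne dic (v + 1) hxn] at hx
            obtain ⟨h0, hall⟩ := hvals x u hx
            exact ⟨h0, fun k hk1 hk2 => List.mem_append_left _ (hall k hk1 hk2)⟩
  · -- fresh-name branch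
    have hcont : dic.contains name = false := by
      rw [← Bool.not_eq_true, PySem.Dict.contains_iff_mem_keys]; exact hmem
    have husedc : PySem.Set.contains used name = false := by
      simp only [PySem.Set.contains]
      simp only [List.contains_eq_mem, decide_eq_false_iff_not]
      rw [← hkeys]; exact hmem
    refine ⟨name, dic.insert name 0, ?_, ?_, ?_⟩
    · simp [pvStepA, hcont]
    · have hnu : name ∉ used := by rw [← hkeys]; exact hmem
      simp only [pvStepB, husedc, PySem.Set.add]
      simp [hnu]
    · constructor
      · rw [PySem.Dict.keys_insert_of_not_contains dic 0 hcont, hkeys]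
      · intro x u hx
        by_cases hxn : x = name
        · subst hxn
          rw [PySem.Dict.get?_insert_self] at hx
          cases hx
          exact ⟨le_refl 0, fun k hk1 hk2 => absurd (hk1.trans hk2) (by norm_num)⟩
        · rw [PySem.Dict.get?_insert_of_ne dic 0 hxn] at hx
          obtain ⟨h0, hall⟩ := hvals x u hx
          exact ⟨h0, fun k hk1 hk2 => List.mem_append_left _ (hall k hk1 hk2)⟩

theorem pvFold_eq : ∀ (names : List String) (dic : PySem.Dict String Int)
    (used : List String) (resA resB : List String), pvInv dic used →
    ∃ outs, (names.foldl pvStepA (dic, resA)).2 = resA ++ outs ∧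
            (names.foldl pvStepB (used, resB)).2 = resB ++ outs := by
  intro names
  induction names with
  | nil => intro dic used resA resB _; exact ⟨[], by simp, by simp⟩
  | cons name rest ih =>
    intro dic used resA resB hinv
    obtain ⟨out, dic', hA, hB, hinv'⟩ := pvStep_eq dic used resA resB name hinv
    obtain ⟨outs, hA', hB'⟩ := ih dic' (used ++ [out]) (resA ++ [out]) (resB ++ [out]) hinv'
    refine ⟨out :: outs, ?_, ?_⟩
    · rw [List.foldl_cons, hA, hA']; simp
    · rw [List.foldl_cons, hB, hB']; simp

-- ===== VERDICT (by name: the statement is the Claim_ definition above) =====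
theorem getFolderNames_spec : Claim_equal_getFolderNames := by
  intro names _
  unfold Spec_getFolderNames getFolderNames getFolderNames_alt
  have hinv : pvInv PySem.Dict.empty [] := by
    constructor
    · simp [PySem.Dict.keys, PySem.Dict.empty]
    · intro x v h
      simp [PySem.Dict.get?_empty] at h
  obtain ⟨outs, hA, hB⟩ := pvFold_eq names PySem.Dict.empty PySem.Set.empty [] [] hinv
  rw [hA, hB]
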